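-- pv_equiv track=rewrite | github.com/EnnioEnnio/bitmex_fundingrate | BitmexFundingRateFetcher.py | filter_double_entries
-- ===== SOURCE A (Python) =====
-- def filter_double_entries(data_list):
--     filtered_data_array = []
--     filtered_data_array.append(data_list[0])
--
--     for i in range(1, len(data_list)):
--         if (data_list[i - 1])[0] == (data_list[i])[0]:
--             continue
--         filtered_data_array.append(data_list[i])
--
--     return filtered_data_array
-- ===== SOURCE B (Python) =====
-- def filter_double_entries(data_list):
--     # Stage 1: split the list into maximal runs of entries sharing the same
--     # first element (a list of groups, groupby-style).
--     groups = []
--     for entry in data_list: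
--         if groups and groups[-1][0][0] == entry[0]:
--             groups[-1].append(entry)
--         else:
--             groups.append([entry])
--     # Stage 2: keep the first entry of each run.
--     return [g[0] for g in groups]
-- ===== Notes on version B (the rewrite author's own statement) =====
-- stated objective: alternative
-- what changed: B works in two stages on a different intermediate data structure: it first splits the input into maximal runs (groups) of entries with equal first element, groupby-style, then projects the first entry of each run; A does a single index loop comparing adjacent positions.
import Mathlib
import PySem

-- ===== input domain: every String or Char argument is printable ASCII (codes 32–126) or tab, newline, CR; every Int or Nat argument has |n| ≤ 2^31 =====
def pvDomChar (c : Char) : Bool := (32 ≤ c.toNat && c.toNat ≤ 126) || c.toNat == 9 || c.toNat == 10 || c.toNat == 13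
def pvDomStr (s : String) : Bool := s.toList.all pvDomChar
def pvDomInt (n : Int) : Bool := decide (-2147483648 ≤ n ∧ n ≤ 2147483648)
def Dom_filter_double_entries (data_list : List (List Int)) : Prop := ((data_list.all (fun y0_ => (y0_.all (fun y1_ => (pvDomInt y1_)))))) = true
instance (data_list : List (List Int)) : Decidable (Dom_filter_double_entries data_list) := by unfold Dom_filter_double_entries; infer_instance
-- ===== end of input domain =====

-- B re-implements A in two stages (split into maximal runs of equal first element, then
-- take the head of each run) instead of A's index loop; same return value, no mutation.

-- ===== PORT A =====
def filter_double_entries (data_list : List (List Int)) : List (List Int) :=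
  let filtered_data_array : List (List Int) := [] ++ [PySem.List.pyGetD data_list 0 []]
  (PySem.List.pyRange 1 (data_list.length : Int) 1).foldl
    (fun acc i =>
      if PySem.List.pyGetD (PySem.List.pyGetD data_list (i - 1) []) 0 0
           == PySem.List.pyGetD (PySem.List.pyGetD data_list i []) 0 0
      then acc
      else acc ++ [PySem.List.pyGetD data_list i []])
    filtered_data_array

-- ===== PORT B =====
-- one step of B's grouping loop: append to the last run or start a new run
def fde_step (groups : List (List (List Int))) (entry : List Int) : List (List (List Int)) :=
  match groups.getLast? with
  | some g =>
      if PySem.List.pyGetD (PySem.List.pyGetD g 0 []) 0 0 == PySem.List.pyGetD entry 0 0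
      then groups.dropLast ++ [g ++ [entry]]
      else groups ++ [[entry]]
  | none => groups ++ [[entry]]

def filter_double_entries_alt (data_list : List (List Int)) : List (List Int) :=
  (data_list.foldl fde_step []).map (fun g => PySem.List.pyGetD g 0 [])
  -- g[0]: each run is nonempty by construction, so the default is never used

-- ===== PRECONDITION & SPEC =====
-- Pre_ excludes exactly the inputs where Python A raises IndexError: the empty list
-- (data_list[0]), and lists of length ≥ 2 containing an empty inner list (its [0] is read).
def Pre_filter_double_entries (data_list : List (List Int)) : Prop :=
  data_list ≠ [] ∧ (2 ≤ data_list.length → ∀ x ∈ data_list, x ≠ [])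
instance (data_list : List (List Int)) : Decidable (Pre_filter_double_entries data_list) := by
  unfold Pre_filter_double_entries; infer_instance
def pvWitness_filter_double_entries : List (List Int) := [[1, 5], [1, 6], [2, 7]]

def Spec_filter_double_entries (data_list : List (List Int)) (out : List (List Int)) : Prop := out = filter_double_entries_alt data_list
instance (data_list : List (List Int)) (out : List (List Int)) : Decidable (Spec_filter_double_entries data_list out) := by unfold Spec_filter_double_entries; infer_instance

-- ===== CLAIM (what is proved, stated in full; the proofs are below) =====
def Claim_equal_filter_double_entries : Prop := ∀ (data_list : List (List Int)), Dom_filter_double_entries data_list → Pre_filter_double_entries data_list → Spec_filter_double_entries data_list (filter_double_entries data_list)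

-- ===== LEMMAS AND PROOFS =====

-- key of an entry, as both ports read it
def pvKey (x : List Int) : Int := PySem.List.pyGetD x 0 0

-- adjacent-comparison chain (A's shape)
def pvChain (x : List Int) : List (List Int) → List (List Int)
  | [] => []
  | y :: t => if pvKey x == pvKey y then pvChain y t else y :: pvChain y t

def pvHd (g : List (List Int)) : List Int := PySem.List.pyGetD g 0 []

-- B's grouping fold, projected to run-heads, equals A's chain: the key compared
-- against is the head of the last run, whose key equals the last processed key.
lemma LB (t : List (List Int)) : ∀ (gs : List (List (List Int))) (h : List Int)
    (r : List (List Int)) (x : List Int), pvKey h = pvKey x →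
    (t.foldl fde_step (gs ++ [h :: r])).map pvHd = gs.map pvHd ++ [h] ++ pvChain x t := by
  induction t with
  | nil =>
      intro gs h r x _
      simp [pvChain, pvHd, PySem.List.pyGetD]
  | cons y t ih =>
      intro gs h r x hk
      rw [List.foldl_cons]
      have hstep : fde_step (gs ++ [h :: r]) y =
          if pvKey h == pvKey y
          then gs ++ [h :: (r ++ [y])]
          else (gs ++ [h :: r]) ++ [[y]] := by
        unfold fde_step
        rw [List.getLast?_concat]
        simp [pvKey, PySem.List.pyGetD]
      rw [hstep]
      by_cases hxy : pvKey x = pvKey y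
      · rw [if_pos (by simp [hk, hxy]), ih gs h (r ++ [y]) y (hk.trans hxy)]
        simp [pvChain, hxy]
      · rw [if_neg (by simp [hk, hxy]), ih (gs ++ [h :: r]) y [] y rfl]
        simp [pvChain, hxy, pvHd, PySem.List.pyGetD]

lemma LA (l : List (List Int)) : ∀ (n j : Nat), 1 ≤ j → n = l.length - j →
    ∀ acc : List (List Int),
    (PySem.List.pyRange (j : Int) (l.length : Int) 1).foldl
      (fun acc i =>
        if PySem.List.pyGetD (PySem.List.pyGetD l (i - 1) []) 0 0
             == PySem.List.pyGetD (PySem.List.pyGetD l i []) 0 0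
        then acc
        else acc ++ [PySem.List.pyGetD l i []])
      acc = acc ++ pvChain (l.getD (j - 1) []) (l.drop j)
  | 0, j, hj, hn, acc => by
      have hle : l.length ≤ j := by omega
      rw [PySem.List.pyRange_one_eq_nil (by exact_mod_cast hle)]
      rw [List.drop_eq_nil_of_le hle]
      simp [pvChain]
  | n + 1, j, hj, hn, acc => by
      have hlt : j < l.length := by omega
      rw [PySem.List.pyRange_one_cons (by exact_mod_cast hlt)]
      rw [List.foldl_cons]
      have hcast : (j : Int) + 1 = ((j + 1 : Nat) : Int) := by push_cast; ring
      rw [hcast, LA l n (j + 1) (by omega) (by omega)]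
      have h1 : PySem.List.pyGetD l ((j : Int) - 1) [] = l.getD (j - 1) [] := by
        have : (j : Int) - 1 = ((j - 1 : Nat) : Int) := by omega
        rw [this, PySem.List.pyGetD_natCast]
      have h2 : PySem.List.pyGetD l (j : Int) [] = l.getD j [] := PySem.List.pyGetD_natCast ..
      have hdrop : l.drop j = l[j] :: l.drop (j + 1) := (List.getElem_cons_drop hlt).symm
      have hget : l.getD j [] = l[j] := List.getD_eq_getElem l [] hlt
      rw [h1, h2, hdrop]
      simp only [pvChain, pvKey, hget, Nat.add_sub_cancel]
      split <;> simp

lemma chain_head (x : List Int) (t : List (List Int)) :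
    filter_double_entries (x :: t) = x :: pvChain x t := by
  unfold filter_double_entries
  have h := LA (x :: t) ((x :: t).length - 1) 1 (by omega) rfl
              ([] ++ [PySem.List.pyGetD (x :: t) 0 []])
  simp only [Nat.cast_one] at h
  show _ = _
  rw [h]
  simp [PySem.List.pyGetD]

lemma alt_head (x : List Int) (t : List (List Int)) :
    filter_double_entries_alt (x :: t) = x :: pvChain x t := by
  unfold filter_double_entries_alt
  show (List.foldl fde_step [] (x :: t)).map pvHd = _
  rw [List.foldl_cons]
  have hstep : fde_step [] x = [] ++ [x :: []] := by simp [fde_step]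
  rw [hstep, LB t [] x [] x rfl]
  simp

-- ===== VERDICT (by name: the statement is the Claim_ definition above) =====
theorem filter_double_entries_spec : Claim_equal_filter_double_entries := by
  intro data_list _ hpre
  unfold Spec_filter_double_entries
  cases data_list with
  | nil => exact absurd rfl hpre.1
  | cons x t => rw [chain_head, alt_head]
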